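-- pv_equiv track=rewrite | github.com/NorthblueM/IM-position-effect-paper-scripts | stats_im_ions/tools/df_apply_mutli.py | split_id
-- ===== SOURCE A (Python) =====
-- def split_id(n_proess, num):
--     """总共需要计算num次, 平均分配给n_proess线程
--     [(start, end)]
--         start从0开始
--         end索引时不被选择
--     """
--     ls = []
--     interval = int(num/n_proess)
--     rem = num%n_proess #余数
--     # 数据划分样例：012|345|67|89
--     for i in range(n_proess):
--         start = i*interval
--         end = (i+1)*interval
--         if i < rem:
--             start += i
--             end += (i+1)
--         else:
--             start += rem
--             end += rem
--         ls.append((start,end))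
--     return ls
-- ===== SOURCE B (Python) =====
-- def split_id(n_proess, num):
--     interval = int(num / n_proess)
--     rem = num % n_proess
--     ls = []
--     start = 0
--     for i in range(n_proess):
--         end = start + interval + (1 if i < rem else 0)
--         ls.append((start, end))
--         start = end
--     return ls
-- ===== Notes on version B (the rewrite author's own statement) =====
-- stated objective: alternative
-- what changed: Replaces A's independent per-index closed-form start/end arithmetic (with an if-branch adjusting both ends) by a single running cursor: each chunk's size is interval plus one for the first rem indices, and start is threaded through the loop.
import Mathlib
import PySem

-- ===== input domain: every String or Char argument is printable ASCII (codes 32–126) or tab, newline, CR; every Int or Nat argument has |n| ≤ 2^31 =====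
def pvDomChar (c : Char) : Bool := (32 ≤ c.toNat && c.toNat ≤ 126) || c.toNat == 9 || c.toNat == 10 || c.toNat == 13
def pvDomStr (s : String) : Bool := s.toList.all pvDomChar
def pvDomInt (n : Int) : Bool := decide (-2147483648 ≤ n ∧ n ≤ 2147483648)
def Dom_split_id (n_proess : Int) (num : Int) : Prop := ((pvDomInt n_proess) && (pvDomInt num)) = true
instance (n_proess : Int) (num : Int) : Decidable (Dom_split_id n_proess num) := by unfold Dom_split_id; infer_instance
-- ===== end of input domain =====

-- B replaces A's independent per-index closed-form start/end arithmetic with a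
-- running cursor threaded through the loop (objective: alternative decomposition).

-- ===== PORT A =====
-- int(num/n_proess) is float division then truncation; PySem.Int.truncdiv is exact
-- for |num|,|n_proess| ≤ 2^31 < 2^53, which Dom guarantees.
def split_id (n_proess : Int) (num : Int) : List (Int × Int) :=
  let interval := PySem.Int.truncdiv num n_proess
  let rem := PySem.Int.mod num n_proess
  (PySem.List.pyRange 0 n_proess 1).foldl (fun ls i =>
    let start := i * interval
    let end_ := (i + 1) * interval
    if i < rem then ls ++ [(start + i, end_ + (i + 1))]
    else ls ++ [(start + rem, end_ + rem)]) []

-- ===== PORT B =====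
def split_id_alt (n_proess : Int) (num : Int) : List (Int × Int) :=
  let interval := PySem.Int.truncdiv num n_proess
  let rem := PySem.Int.mod num n_proess
  ((PySem.List.pyRange 0 n_proess 1).foldl (fun (st : List (Int × Int) × Int) i =>
    let e := st.2 + interval + (if i < rem then 1 else 0)
    (st.1 ++ [(st.2, e)], e)) ([], 0)).1

-- ===== PRECONDITION & SPEC =====
-- Pre_ excludes only n_proess = 0, where A (and B) raise ZeroDivisionError.
def Pre_split_id (n_proess : Int) (num : Int) : Prop := n_proess ≠ 0
instance (n_proess : Int) (num : Int) : Decidable (Pre_split_id n_proess num) := by unfold Pre_split_id; infer_instance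
def pvWitness_split_id : Int × Int := (3, 10)
def Spec_split_id (n_proess : Int) (num : Int) (out : List (Int × Int)) : Prop := out = split_id_alt n_proess num
instance (n_proess : Int) (num : Int) (out : List (Int × Int)) : Decidable (Spec_split_id n_proess num out) := by unfold Spec_split_id; infer_instance

-- ===== CLAIM (what is proved, stated in full; the proofs are below) =====
def Claim_equal_split_id : Prop := ∀ (n_proess : Int) (num : Int), Dom_split_id n_proess num → Pre_split_id n_proess num → Spec_split_id n_proess num (split_id n_proess num)

-- ===== LEMMAS AND PROOFS =====

-- the common start-position function: start of chunk i
def pvS (interval rem i : Int) : Int := i * interval + min i rem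

-- A's per-index entry is (pvS i, pvS (i+1))
theorem pvA_entry (interval rem i : Int) :
    (if i < rem then ((i * interval + i, (i + 1) * interval + (i + 1)) : Int × Int)
     else (i * interval + rem, (i + 1) * interval + rem))
      = (pvS interval rem i, pvS interval rem (i + 1)) := by
  unfold pvS
  split_ifs with h <;> refine Prod.ext ?_ ?_ <;> simp <;> omega

-- B's fold over a consecutive range, with the cursor at pvS a, produces A's entries
theorem pvB_fold (interval rem : Int) (k : Nat) :
    ∀ (a : Int) (acc : List (Int × Int)),
    ((PySem.List.pyRange a (a + k) 1).foldl (fun (st : List (Int × Int) × Int) i =>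
        let e := st.2 + interval + (if i < rem then 1 else 0)
        (st.1 ++ [(st.2, e)], e)) (acc, pvS interval rem a)).1
      = acc ++ (PySem.List.pyRange a (a + k) 1).map
          (fun i => (pvS interval rem i, pvS interval rem (i + 1))) := by
  induction k with
  | zero => intro a acc; simp
  | succ m ih =>
    intro a acc
    rw [PySem.List.pyRange_one_cons (by push_cast; omega : a < a + ((m+1 : Nat) : Int))]
    simp only [List.foldl_cons, List.map_cons]
    have hstep : pvS interval rem a + interval + (if a < rem then 1 else 0)
        = pvS interval rem (a + 1) := by unfold pvS; rw [add_one_mul]; split_ifs with h <;> omega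
    have hb : a + ((m+1 : Nat) : Int) = (a + 1) + (m : Nat) := by push_cast; omega
    rw [hb, hstep]
    rw [ih (a + 1) (acc ++ [(pvS interval rem a, pvS interval rem (a + 1))])]
    simp

-- ===== VERDICT (by name: the statement is the Claim_ definition above) =====
theorem split_id_spec : Claim_equal_split_id := by
  intro n num _ hpre
  unfold Spec_split_id split_id split_id_alt
  set interval := PySem.Int.truncdiv num n with hI
  set rem := PySem.Int.mod num n with hR
  by_cases hn : n ≤ 0
  · rw [PySem.List.pyRange_one_eq_nil hn]; rfl
  · replace hn : 0 < n := by omega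
    have hrem : 0 ≤ rem := PySem.Int.mod_nonneg num hn
    have hS0 : pvS interval rem 0 = 0 := by unfold pvS; omega
    have hn' : (0 : Int) + (n.toNat : Nat) = n := by omega
    -- A's side: append-of-singleton fold is a map
    have hA : (PySem.List.pyRange 0 n 1).foldl (fun ls i =>
        let start := i * interval
        let end_ := (i + 1) * interval
        if i < rem then ls ++ [(start + i, end_ + (i + 1))]
        else ls ++ [(start + rem, end_ + rem)]) []
        = (PySem.List.pyRange 0 n 1).map
            (fun i => (pvS interval rem i, pvS interval rem (i + 1))) := by
      have := PySem.List.foldl_append_singleton_eq_map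
        (l := PySem.List.pyRange 0 n 1)
        (f := fun i => if i < rem then ((i * interval + i, (i + 1) * interval + (i + 1)) : Int × Int)
                       else (i * interval + rem, (i + 1) * interval + rem)) (acc := [])
      simp only [List.nil_append] at this
      rw [show (fun (ls : List (Int × Int)) (i : Int) =>
          let start := i * interval
          let end_ := (i + 1) * interval
          if i < rem then ls ++ [(start + i, end_ + (i + 1))]
          else ls ++ [(start + rem, end_ + rem)])
        = (fun ls i => ls ++ [if i < rem then ((i * interval + i, (i + 1) * interval + (i + 1)) : Int × Int)
                       else (i * interval + rem, (i + 1) * interval + rem)]) from by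
          funext ls i; by_cases h : i < rem <;> simp [h]]
      rw [this]
      exact List.map_congr_left (fun i _ => pvA_entry interval rem i)
    rw [hA]
    have hB := pvB_fold interval rem n.toNat 0 []
    rw [hn'] at hB
    simp only [List.nil_append] at hB
    rw [hS0] at hB
    exact hB.symm
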